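-- pv_equiv track=rewrite | github.com/Fairc11/Ptu-Fairc11 | backend/app/services/downloader.py | _guess_extension
-- ===== SOURCE A (Python) =====
-- def _guess_extension(url: str) -> str:
--     # zjcdn.com 域名必定是视频
--     if 'zjcdn.com' in url:
--         return '.mp4'
--     u = url.split("?")[0].split("#")[0].lower()
--     for e in [".jpg", ".jpeg", ".png", ".gif", ".webp", ".mp4",
--                ".mov", ".mp3", ".aac", ".m4a", ".heic", ".webm"]:
--         if u.endswith(e):
--             return e
--     return ".jpg"
-- ===== SOURCE B (Python) =====
-- _VALID = frozenset((".jpg", ".jpeg", ".png", ".gif", ".webp", ".mp4",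
--                     ".mov", ".mp3", ".aac", ".m4a", ".heic", ".webm"))
--
-- def _guess_extension(url: str) -> str:
--     # zjcdn.com domain is always video
--     if 'zjcdn.com' in url:
--         return '.mp4'
--     u = url.split("?")[0].split("#")[0].lower()
--     # single backward scan: grab the suffix starting at the last '.', then one set lookup
--     ext = []
--     for ch in reversed(u):
--         ext.append(ch)
--         if ch == '.':
--             suffix = ''.join(reversed(ext))
--             return suffix if suffix in _VALID else '.jpg'
--     return '.jpg'
-- ===== Notes on version B (the rewrite author's own statement) =====
-- stated objective: alternative
-- what changed: replaces the 12-way endswith scan by a single backward scan that extracts the suffix at the last dot and one frozenset lookup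
import Mathlib
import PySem

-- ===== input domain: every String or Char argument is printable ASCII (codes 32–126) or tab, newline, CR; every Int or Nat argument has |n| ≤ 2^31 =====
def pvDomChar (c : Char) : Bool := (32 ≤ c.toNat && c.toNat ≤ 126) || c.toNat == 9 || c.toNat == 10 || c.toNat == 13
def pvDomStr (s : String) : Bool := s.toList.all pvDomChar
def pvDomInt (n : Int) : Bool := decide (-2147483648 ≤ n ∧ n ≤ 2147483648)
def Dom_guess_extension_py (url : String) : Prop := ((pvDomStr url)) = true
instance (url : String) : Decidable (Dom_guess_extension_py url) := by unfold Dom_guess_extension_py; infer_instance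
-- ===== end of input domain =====

-- B replaces A's 12-way endswith scan by one backward scan to the last '.' plus a single set lookup (alternative decomposition, same observable result).

-- url.split("?")[0].split("#")[0].lower() — identical normalization line in both Pythons.
-- split? is none only for sep = "" and split always returns a nonempty list, so neither
-- .getD [] nor .headD "" default is ever taken: exact.
def pyNormalize (url : String) : String :=
  PySem.Str.lower ((PySem.Str.split? (((PySem.Str.split? url "?").getD []).headD "") "#").getD [] |>.headD "")

-- ===== PORT A =====
def pyExtsA : List String :=
  [".jpg", ".jpeg", ".png", ".gif", ".webp", ".mp4",
   ".mov", ".mp3", ".aac", ".m4a", ".heic", ".webm"]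

-- the for-loop over the extension list with its early return
def guessLoopA (u : String) : List String → String
  | [] => ".jpg"
  | e :: es => if PySem.Str.endswith u e then e else guessLoopA u es

def guess_extension_py (url : String) : String :=
  if PySem.Str.isIn "zjcdn.com" url then ".mp4"
  else guessLoopA (pyNormalize url) pyExtsA

-- ===== PORT B =====
-- the frozenset _VALID (12 distinct extensions, as lists of code points)
def pyValidB : PySem.Set (List Char) :=
  PySem.Set.ofList
    [".jpg".toList, ".jpeg".toList, ".png".toList, ".gif".toList, ".webp".toList, ".mp4".toList,
     ".mov".toList, ".mp3".toList, ".aac".toList, ".m4a".toList, ".heic".toList, ".webm".toList]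

-- for ch in reversed(u): ext.append(ch); if ch == '.': suffix = ''.join(reversed(ext)); return suffix if suffix in _VALID else '.jpg'
-- (the str suffix is compared as its list of code points, which is the same comparison)
def guessLoopB : List Char → List Char → String
  | [], _ => ".jpg"
  | c :: r, ext =>
    if c = '.' then
      (let suffix := (ext ++ [c]).reverse
       if pyValidB.contains suffix then String.ofList suffix else ".jpg")
    else guessLoopB r (ext ++ [c])

def guess_extension_py_alt (url : String) : String :=
  if PySem.Str.isIn "zjcdn.com" url then ".mp4"
  else guessLoopB (pyNormalize url).toList.reverse []

-- ===== PRECONDITION & SPEC =====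
def Spec_guess_extension_py (url : String) (out : String) : Prop := out = guess_extension_py_alt url
instance (url : String) (out : String) : Decidable (Spec_guess_extension_py url out) := by unfold Spec_guess_extension_py; infer_instance

-- ===== CLAIM (what is proved, stated in full; the proofs are below) =====
def Claim_equal_guess_extension_py : Prop := ∀ (url : String), Dom_guess_extension_py url → Spec_guess_extension_py url (guess_extension_py url)

-- ===== LEMMAS AND PROOFS =====

-- B's loop on a dot-free list returns ".jpg"
lemma loopB_no_dot (r : List Char) (ext : List Char) (h : '.' ∉ r) :
    guessLoopB r ext = ".jpg" := by
  induction r generalizing ext with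
  | nil => rfl
  | cons c r ih =>
    simp only [List.mem_cons, not_or] at h
    simp only [guessLoopB, if_neg (Ne.symm h.1)]
    exact ih _ h.2

-- B's loop on xs ++ '.' :: rest with dot-free xs stops at that first dot
lemma loopB_split (xs rest ext : List Char) (h : '.' ∉ xs) :
    guessLoopB (xs ++ '.' :: rest) ext =
      (if pyValidB.contains ('.' :: (xs.reverse ++ ext.reverse)) then String.ofList ('.' :: (xs.reverse ++ ext.reverse)) else ".jpg") := by
  induction xs generalizing ext with
  | nil => simp [guessLoopB]
  | cons c xs ih =>
    simp only [List.mem_cons, not_or] at h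
    simp only [List.cons_append, guessLoopB, if_neg (Ne.symm h.1)]
    rw [ih _ h.2]
    simp [List.append_assoc]

-- the dot-free prefix before a '.' is unique
lemma first_dot_unique : ∀ (a b ra rb : List Char), '.' ∉ a → '.' ∉ b →
    a ++ '.' :: ra = b ++ '.' :: rb → a = b := by
  intro a
  induction a with
  | nil =>
    intro b ra rb _ hb heq
    cases b with
    | nil => rfl
    | cons d b =>
      simp only [List.nil_append, List.cons_append, List.cons.injEq] at heq
      exact absurd (heq.1 ▸ List.mem_cons_self) hb
  | cons c a ih =>
    intro b ra rb ha hb heq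
    simp only [List.mem_cons, not_or] at ha
    cases b with
    | nil =>
      simp only [List.cons_append, List.nil_append, List.cons.injEq] at heq
      exact absurd heq.1 (Ne.symm ha.1)
    | cons d b =>
      simp only [List.cons_append, List.cons.injEq] at heq
      simp only [List.mem_cons, not_or] at hb
      rw [heq.1, ih b ra rb ha.2 hb.2 heq.2]

-- endswith by a single-dot extension e ⟺ e is exactly the suffix at the last dot of u
lemma endswith_char (u : String) (e xs rest : List Char)
    (h1 : e.head? = some '.') (h2 : '.' ∉ e.tail)
    (hr : u.toList.reverse = xs ++ '.' :: rest) (hxs : '.' ∉ xs) :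
    (PySem.Str.endswith u (String.ofList e) = true ↔ e = '.' :: xs.reverse) := by
  obtain ⟨m, rfl⟩ : ∃ m, e = '.' :: m := by
    cases e with
    | nil => simp at h1
    | cons c m => exact ⟨m, by simpa using (congrArg (fun o => (Option.getD o ' ') :: m) h1.symm).symm⟩
  simp only [List.tail_cons] at h2
  rw [PySem.Str.endswith_eq, PySem.Chars.endswith_iff]
  simp only [String.toList_ofList]
  constructor
  · intro hsuf
    rw [← List.reverse_prefix] at hsuf
    obtain ⟨t, ht⟩ := hsuf
    rw [hr] at ht
    simp only [List.reverse_cons, List.append_assoc, List.singleton_append] at ht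
    have hmx : m.reverse = xs :=
      first_dot_unique m.reverse xs t rest (by simpa using h2) hxs ht
    rw [← hmx, List.reverse_reverse]
  · intro he
    have hm : m = xs.reverse := by simpa using congrArg List.tail he
    rw [← List.reverse_prefix, hr, hm]
    exact ⟨rest, by simp⟩

-- A's endswith chain when every extension fails
lemma chain_none (u : String) (es : List String)
    (h : ∀ e ∈ es, PySem.Str.endswith u e = false) :
    guessLoopA u es = ".jpg" := by
  induction es with
  | nil => rfl
  | cons e es ih =>
    simp only [guessLoopA, h e List.mem_cons_self]
    exact ih (fun e' he' => h e' (List.mem_cons_of_mem _ he'))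

-- A's endswith chain when matching is equivalent to equality with a fixed suffix e₀
lemma chain_spec (u : String) (e₀ : List Char) (es : List String)
    (h : ∀ e ∈ es, (PySem.Str.endswith u e = true ↔ e.toList = e₀)) :
    guessLoopA u es = if (es.map String.toList).contains e₀ then String.ofList e₀ else ".jpg" := by
  induction es with
  | nil => rfl
  | cons e es ih =>
    by_cases hend : PySem.Str.endswith u e = true
    · have he : e.toList = e₀ := (h e List.mem_cons_self).mp hend
      simp only [guessLoopA, hend, if_true, List.map_cons, List.contains_cons]
      simp [← he]
    · have hne : e.toList ≠ e₀ := fun hc => hend ((h e List.mem_cons_self).mpr hc)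
      simp only [guessLoopA, hend, List.map_cons, List.contains_cons]
      rw [ih (fun e' he' => h e' (List.mem_cons_of_mem _ he'))]
      have hne' : ¬ (e₀ = e.toList) := fun hc => hne hc.symm
      simp [hne']

lemma exists_first_dot (r : List Char) (h : '.' ∈ r) :
    ∃ xs rest, r = xs ++ '.' :: rest ∧ '.' ∉ xs := by
  induction r with
  | nil => simp at h
  | cons c r ih =>
    by_cases hc : c = '.'
    · exact ⟨[], r, by simp [hc], by simp⟩
    · have : '.' ∈ r := by
        rcases List.mem_cons.mp h with h1 | h1
        · exact absurd h1.symm hc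
        · exact h1
      obtain ⟨xs, rest, hr, hxs⟩ := ih this
      exact ⟨c :: xs, rest, by simp [hr], by simp [Ne.symm hc, hxs]⟩

-- every extension in A's list starts with '.' and has no further dot
lemma exts_shape : ∀ e ∈ pyExtsA, e.toList.head? = some '.' ∧ '.' ∉ e.toList.tail := by decide

-- the frozenset of B holds exactly the toLists of A's list
lemma valid_eq : pyValidB = pyExtsA.map String.toList := by decide

-- the core equivalence: the endswith chain equals the backward scan
lemma main_lemma (u : String) :
    guessLoopA u pyExtsA = guessLoopB u.toList.reverse [] := by
  by_cases hdot : '.' ∈ u.toList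
  · obtain ⟨xs, rest, hr, hxs⟩ := exists_first_dot u.toList.reverse (by simpa using hdot)
    rw [hr, loopB_split xs rest [] hxs]
    simp only [List.reverse_nil, List.append_nil]
    rw [chain_spec u ('.' :: xs.reverse) pyExtsA
        (fun e he => by
          have hs := exts_shape e he
          simpa using endswith_char u e.toList xs rest hs.1 hs.2 hr hxs)]
    rw [← valid_eq]
    rfl
  · rw [loopB_no_dot _ _ (by simpa using hdot)]
    refine chain_none u pyExtsA (fun e he => ?_)
    by_contra hc
    rw [Bool.not_eq_false, PySem.Str.endswith_eq, PySem.Chars.endswith_iff] at hc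
    have hdm : '.' ∈ e.toList := by
      have hs := exts_shape e he
      cases het : e.toList with
      | nil => rw [het] at hs; simp at hs
      | cons c m =>
        rw [het] at hs
        simp only [List.head?_cons, Option.some.injEq] at hs
        simp [hs.1]
    exact hdot (hc.subset hdm)

-- ===== VERDICT (by name: the statement is the Claim_ definition above) =====
theorem guess_extension_py_spec : Claim_equal_guess_extension_py := by
  intro url _
  unfold Spec_guess_extension_py guess_extension_py guess_extension_py_alt
  rw [main_lemma]
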